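-- pv_equiv track=rewrite | github.com/Kwabratseur/Surface_Solar_Load_Statistics | surface_solar_load_statistics/Get_Radiation.py | SlopeColumnMapping
-- ===== SOURCE A (Python) =====
-- def SlopeColumnMapping(slopes):
--     AmountOfColumns = 6
--     counter = 1
--     PlotStructure = []
--     for i in slopes:
--         temp = []
--         for j in range(AmountOfColumns):
--             temp.append(counter)
--             counter += 1
--         PlotStructure.append(temp)
--         counter += 2
--     return PlotStructure
-- ===== SOURCE B (Python) =====
-- def SlopeColumnMapping(slopes):
--     # closed form: row k starts at 8*k + 1 (6 counters per row, then skip 2)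
--     return [list(range(8 * k + 1, 8 * k + 7)) for k in range(len(slopes))]
-- ===== Notes on version B (the rewrite author's own statement) =====
-- stated objective: simpler
-- what changed: Drops the threaded cross-iteration counter and the inner append loop; each row is computed independently in closed form as list(range(8*k+1, 8*k+7)) from its index k.
import Mathlib
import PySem

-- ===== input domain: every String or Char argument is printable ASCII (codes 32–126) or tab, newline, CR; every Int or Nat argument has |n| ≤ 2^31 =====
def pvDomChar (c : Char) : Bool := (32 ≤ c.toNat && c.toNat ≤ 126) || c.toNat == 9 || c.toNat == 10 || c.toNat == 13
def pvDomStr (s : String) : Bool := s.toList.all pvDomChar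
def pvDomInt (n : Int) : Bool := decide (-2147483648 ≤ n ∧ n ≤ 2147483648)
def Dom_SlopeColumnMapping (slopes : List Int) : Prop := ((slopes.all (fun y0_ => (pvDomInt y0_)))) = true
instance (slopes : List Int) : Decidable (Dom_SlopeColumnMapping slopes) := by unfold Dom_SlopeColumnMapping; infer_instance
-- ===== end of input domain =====

-- B replaces A's threaded counter by the closed-form row start 8*k+1 (simpler decomposition, same cost).

-- ===== PORT A =====
-- state = (counter, PlotStructure); inner loop state = (temp, counter)
def SlopeColumnMapping (slopes : List Int) : List (List Int) :=
  (slopes.foldl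
    (fun (st : Int × List (List Int)) _ =>
      let inner := (List.range 6).foldl
        (fun (tc : List Int × Int) _ => (tc.1 ++ [tc.2], tc.2 + 1)) ([], st.1)
      (inner.2 + 2, st.2 ++ [inner.1]))
    (1, [])).2

-- ===== PORT B =====
def SlopeColumnMapping_alt (slopes : List Int) : List (List Int) :=
  (List.range slopes.length).map
    (fun (k : Nat) => PySem.List.pyRange (8 * (k : Int) + 1) (8 * (k : Int) + 7) 1)

-- ===== PRECONDITION & SPEC =====
def Spec_SlopeColumnMapping (slopes : List Int) (out : List (List Int)) : Prop := out = SlopeColumnMapping_alt slopes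
instance (slopes : List Int) (out : List (List Int)) : Decidable (Spec_SlopeColumnMapping slopes out) := by unfold Spec_SlopeColumnMapping; infer_instance

-- ===== CLAIM (what is proved, stated in full; the proofs are below) =====
def Claim_equal_SlopeColumnMapping : Prop := ∀ (slopes : List Int), Dom_SlopeColumnMapping slopes → Spec_SlopeColumnMapping slopes (SlopeColumnMapping slopes)

-- ===== LEMMAS AND PROOFS =====

-- the inner 6-step loop produces the six consecutive counters and advances the counter by 6
lemma inner_loop (c : Int) :
    (List.range 6).foldl (fun (tc : List Int × Int) _ => (tc.1 ++ [tc.2], tc.2 + 1)) ([], c)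
      = ([c, c + 1, c + 2, c + 3, c + 4, c + 5], c + 6) := by
  simp only [List.range_succ, List.range_zero, List.foldl_append, List.foldl_cons,
    List.foldl_nil, List.nil_append]
  norm_num
  omega

lemma row_eq (c : Int) :
    PySem.List.pyRange c (c + 6) 1 = [c, c + 1, c + 2, c + 3, c + 4, c + 5] := by
  rw [PySem.List.pyRange_one_cons (by omega), PySem.List.pyRange_one_cons (by omega),
      PySem.List.pyRange_one_cons (by omega), PySem.List.pyRange_one_cons (by omega),
      PySem.List.pyRange_one_cons (by omega), PySem.List.pyRange_one_cons (by omega),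
      PySem.List.pyRange_one_eq_nil (by omega)]
  norm_num
  omega

-- loop invariant: after processing l starting at counter 1 + 8*k with accumulator
-- equal to the first k closed-form rows, the fold yields rows k, k+1, …
lemma fold_invariant (l : List Int) (k : Nat) (acc : List (List Int)) :
    (l.foldl
      (fun (st : Int × List (List Int)) _ =>
        (st.1 + 6 + 2, st.2 ++ [[st.1, st.1 + 1, st.1 + 2, st.1 + 3, st.1 + 4, st.1 + 5]]))
      (8 * (k : Int) + 1, acc)).2
    = acc ++ (List.range l.length).map
        (fun (j : Nat) => PySem.List.pyRange (8 * ((k + j : Nat) : Int) + 1) (8 * ((k + j : Nat) : Int) + 7) 1) := by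
  induction l generalizing k acc with
  | nil => simp
  | cons x xs ih =>
    simp only [List.foldl_cons]
    have h8 : (8 * (k : Int) + 1 + 6 + 2) = 8 * ((k + 1 : Nat) : Int) + 1 := by push_cast; ring
    rw [h8, ih (k + 1)]
    rw [List.length_cons, List.range_succ_eq_map]
    simp only [List.map_cons, List.map_map, List.append_assoc, List.singleton_append]
    congr 1
    rw [show ((k + 0 : Nat) : Int) = (k : Int) from by norm_num,
        show (8 * (k : Int) + 7) = (8 * (k : Int) + 1) + 6 from by ring, row_eq]
    congr 1
    apply List.map_congr_left
    intro j _
    simp only [Function.comp, Nat.succ_eq_add_one]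
    rw [show k + 1 + j = k + (j + 1) from by omega]

-- ===== VERDICT (by name: the statement is the Claim_ definition above) =====
theorem SlopeColumnMapping_spec : Claim_equal_SlopeColumnMapping := by
  intro slopes _
  unfold Spec_SlopeColumnMapping SlopeColumnMapping SlopeColumnMapping_alt
  simp only [inner_loop]
  have h := fold_invariant slopes 0 []
  simp only [Nat.cast_zero, mul_zero, zero_add, List.nil_append] at h
  rw [h]
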